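-- pv_equiv track=rewrite | github.com/theo-serralta/BLAST-Python-Implementation | src/blast_python.py | find_double_hits
-- ===== SOURCE A (Python) =====
-- def find_double_hits(kmer_positions, max_distance):
--     """
--     Identify double-hits between the query and target sequences.
--
--     Args:
--         kmer_positions (dict): The positions of k-mers in the target sequence.
--         max_distance (int): Maximum allowable distance between two k-mers for a double-hit.
--
--     Returns:
--         list: A list of double-hit positions.
--     """
--     double_hits = []  # Initialize a list to store double hits
--     kmer_list = list(kmer_positions.items())  # Convert the dictionary to a list for indexed access
--
--     # Loop over all k-mers in the query and target sequences
--     for i in range(len(kmer_list)):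
--         kmer1, positions1 = kmer_list[i]  # Get the first k-mer and its positions
--         # Compare with other k-mers in the list
--         for pos1, query_pos1 in positions1:
--             for j in range(i + 1, len(kmer_list)):
--                 kmer2, positions2 = kmer_list[j]  # Get the second k-mer and its positions
--                 for pos2, query_pos2 in positions2:
--                     # Check if the k-mers are on the same diagonal
--                     if (pos1 - query_pos1) == (pos2 - query_pos2):
--                         # Ensure the two hits are close enough but not overlapping
--                         if abs(pos2 - pos1) <= max_distance:
--                             # Ensure they are not in exactly the same location (strict non-overlap)
--                             if pos1 != pos2 or query_pos1 != query_pos2: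
--                                 # Double hit found, append details
--                                 double_hits.append((kmer1, pos1, query_pos1, kmer2, pos2, query_pos2))
--     return double_hits  # Return the list of detected double hits
-- ===== SOURCE B (Python) =====
-- def find_double_hits(kmer_positions, max_distance):
--     items = list(kmer_positions.items())
--     # flatten: one record (group, kmer, pos, query_pos) per hit, in input order
--     entries = [(g, kmer, pos, qpos)
--                for g, (kmer, plist) in enumerate(items)
--                for pos, qpos in plist]
--     # bucket the records by diagonal; only same-diagonal pairs can match
--     buckets = {}
--     for e in entries:
--         buckets.setdefault(e[2] - e[3], []).append(e)
--     out = []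
--     for g1, k1, p1, q1 in entries:
--         for g2, k2, p2, q2 in buckets.get(p1 - q1, []):
--             if g2 > g1 and abs(p2 - p1) <= max_distance and (p1, q1) != (p2, q2):
--                 out.append((k1, p1, q1, k2, p2, q2))
--     return out
-- ===== Notes on version B (the rewrite author's own statement) =====
-- stated objective: faster
-- what changed: A compares every hit against every hit of every later k-mer (all pairs); B flattens the hits once, buckets them by diagonal (pos - query_pos) in a dict, and scans only the same-diagonal bucket for each hit, keeping A's exact output order via group indices.
import Mathlib
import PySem

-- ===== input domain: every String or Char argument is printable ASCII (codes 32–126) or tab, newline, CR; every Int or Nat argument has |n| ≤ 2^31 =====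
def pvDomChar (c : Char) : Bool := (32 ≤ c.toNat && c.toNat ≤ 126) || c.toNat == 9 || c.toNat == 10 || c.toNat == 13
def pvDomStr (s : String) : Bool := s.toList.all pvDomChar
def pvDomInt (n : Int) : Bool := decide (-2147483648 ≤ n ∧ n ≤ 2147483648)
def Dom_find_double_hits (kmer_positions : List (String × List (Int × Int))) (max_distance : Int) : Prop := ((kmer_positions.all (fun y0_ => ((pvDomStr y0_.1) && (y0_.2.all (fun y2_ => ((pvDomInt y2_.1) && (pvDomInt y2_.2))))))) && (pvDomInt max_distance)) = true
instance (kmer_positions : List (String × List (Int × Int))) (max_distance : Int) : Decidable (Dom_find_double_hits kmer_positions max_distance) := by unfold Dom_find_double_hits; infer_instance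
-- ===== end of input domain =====

-- B replaces A's all-pairs quadruple loop by flattening the hits once and bucketing them by
-- diagonal (pos - query_pos), so only same-diagonal records are ever compared (objective: faster).


-- ===== PORT A =====
def find_double_hits (kmer_positions : List (String × List (Int × Int))) (max_distance : Int) : List (String × Int × Int × String × Int × Int) :=
  (PySem.List.pyRange 0 (kmer_positions.length : Int) 1).foldl (fun dh i =>
    let kp1 := PySem.List.pyGetD kmer_positions i ("", [])
    kp1.2.foldl (fun dh pq1 =>
      (PySem.List.pyRange (i + 1) (kmer_positions.length : Int) 1).foldl (fun dh j =>
        let kp2 := PySem.List.pyGetD kmer_positions j ("", [])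
        kp2.2.foldl (fun dh pq2 =>
          if pq1.1 - pq1.2 = pq2.1 - pq2.2 then
            if |pq2.1 - pq1.1| ≤ max_distance then
              if pq1.1 ≠ pq2.1 ∨ pq1.2 ≠ pq2.2 then
                dh ++ [(kp1.1, pq1.1, pq1.2, kp2.1, pq2.1, pq2.2)]
              else dh
            else dh
          else dh) dh) dh) dh) []

-- A's three nested `if`s over one position list are a filter-and-append
-- ===== PORT B =====
def find_double_hits_alt (kmer_positions : List (String × List (Int × Int))) (max_distance : Int) : List (String × Int × Int × String × Int × Int) :=
  let entries : List (Int × String × Int × Int) :=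
    (PySem.List.enumerate kmer_positions 0).flatMap (fun ge =>
      ge.2.2.map (fun pq => (ge.1, ge.2.1, pq.1, pq.2)))
  let buckets :=
    entries.foldl (fun b e =>
      b.modify (e.2.2.1 - e.2.2.2) ([] : List (Int × String × Int × Int)) (· ++ [e]))
      PySem.Dict.empty
  entries.foldl (fun out e1 =>
    (buckets.getD (e1.2.2.1 - e1.2.2.2) []).foldl (fun out e2 =>
      if e1.1 < e2.1 ∧ |e2.2.2.1 - e1.2.2.1| ≤ max_distance ∧ ¬(e1.2.2.1 = e2.2.2.1 ∧ e1.2.2.2 = e2.2.2.2) then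
        out ++ [(e1.2.1, e1.2.2.1, e1.2.2.2, e2.2.1, e2.2.2.1, e2.2.2.2)]
      else out) out) []

-- ===== PRECONDITION & SPEC =====
def Spec_find_double_hits (kmer_positions : List (String × List (Int × Int))) (max_distance : Int) (out : List (String × Int × Int × String × Int × Int)) : Prop := out = find_double_hits_alt kmer_positions max_distance
instance (kmer_positions : List (String × List (Int × Int))) (max_distance : Int) (out : List (String × Int × Int × String × Int × Int)) : Decidable (Spec_find_double_hits kmer_positions max_distance out) := by unfold Spec_find_double_hits; infer_instance

-- ===== CLAIM (what is proved, stated in full; the proofs are below) =====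
def Claim_equal_find_double_hits : Prop := ∀ (kmer_positions : List (String × List (Int × Int))) (max_distance : Int), Dom_find_double_hits kmer_positions max_distance → Spec_find_double_hits kmer_positions max_distance (find_double_hits kmer_positions max_distance)

-- ===== LEMMAS AND PROOFS =====

def entsFrom (g : Int) : List (String × List (Int × Int)) → List (Int × String × Int × Int)
  | [] => []
  | kp :: rest => kp.2.map (fun pq => (g, kp.1, pq.1, pq.2)) ++ entsFrom (g + 1) rest

lemma enumerate_flatMap_eq_entsFrom (l : List (String × List (Int × Int))) : ∀ (s : Int),
    (PySem.List.enumerate l s).flatMap (fun ge => ge.2.2.map (fun pq => (ge.1, ge.2.1, pq.1, pq.2)))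
      = entsFrom s l := by
  induction l with
  | nil => intro s; rfl
  | cons kp rest ih => intro s; simp [PySem.List.enumerate_cons, entsFrom, ih]

lemma mem_entsFrom_ge (e : Int × String × Int × Int) : ∀ (l : List (String × List (Int × Int))) (g : Int),
    e ∈ entsFrom g l → g ≤ e.1 := by
  intro l
  induction l with
  | nil => intro g h; simp [entsFrom] at h
  | cons kp rest ih =>
      intro g h
      simp [entsFrom] at h
      rcases h with ⟨a, b, _, rfl⟩ | h
      · simp
      · have := ih (g + 1) h; omega

lemma bucket_getD (es : List (Int × String × Int × Int)) (c : Int) :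
    (es.foldl (fun b e => b.modify (e.2.2.1 - e.2.2.2) ([] : List (Int × String × Int × Int)) (· ++ [e]))
        PySem.Dict.empty).getD c []
      = es.filter (fun e => e.2.2.1 - e.2.2.2 == c) := by
  have h : es.foldl (fun b e => b.modify (e.2.2.1 - e.2.2.2) ([] : List (Int × String × Int × Int)) (· ++ [e])) PySem.Dict.empty
      = (es.map (fun e => (e.2.2.1 - e.2.2.2, e))).foldl
          (fun (d : PySem.Dict Int (List (Int × String × Int × Int))) p => d.modify p.1 [] (· ++ [p.2])) PySem.Dict.empty := by
    rw [List.foldl_map]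
  rw [h, PySem.Dict.getD_foldl_modify_append]
  simp [List.filter_map, Function.comp_def]

def hitCond (md : Int) (e1 e2 : Int × String × Int × Int) : Bool :=
  decide (e2.2.2.1 - e2.2.2.2 = e1.2.2.1 - e1.2.2.2 ∧ e1.1 < e2.1 ∧ |e2.2.2.1 - e1.2.2.1| ≤ md ∧
    ¬(e1.2.2.1 = e2.2.2.1 ∧ e1.2.2.2 = e2.2.2.2))

def mkHit (e1 e2 : Int × String × Int × Int) : String × Int × Int × String × Int × Int :=
  (e1.2.1, e1.2.2.1, e1.2.2.2, e2.2.1, e2.2.2.1, e2.2.2.2)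

def core (md : Int) (es : List (Int × String × Int × Int)) : List (String × Int × Int × String × Int × Int) :=
  es.flatMap (fun e1 => (es.filter (fun e2 => hitCond md e1 e2)).map (mkHit e1))

theorem B_eq_core (kps : List (String × List (Int × Int))) (md : Int) :
    find_double_hits_alt kps md = core md (entsFrom 0 kps) := by
  unfold find_double_hits_alt
  rw [enumerate_flatMap_eq_entsFrom]
  set es := entsFrom 0 kps with hes
  have hfun : (fun (out : List (String × Int × Int × String × Int × Int)) e1 =>
      ((es.foldl (fun b e => b.modify (e.2.2.1 - e.2.2.2) ([] : List (Int × String × Int × Int)) (· ++ [e]))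
          PySem.Dict.empty).getD (e1.2.2.1 - e1.2.2.2) []).foldl (fun out e2 =>
        if e1.1 < e2.1 ∧ |e2.2.2.1 - e1.2.2.1| ≤ md ∧ ¬(e1.2.2.1 = e2.2.2.1 ∧ e1.2.2.2 = e2.2.2.2) then
          out ++ [(e1.2.1, e1.2.2.1, e1.2.2.2, e2.2.1, e2.2.2.1, e2.2.2.2)]
        else out) out)
      = (fun out e1 => out ++ (es.filter (fun e2 => hitCond md e1 e2)).map (mkHit e1)) := by
    funext out e1
    rw [bucket_getD, PySem.List.foldl_append_ite
      (p := fun e2 : Int × String × Int × Int => e1.1 < e2.1 ∧ |e2.2.2.1 - e1.2.2.1| ≤ md ∧ ¬(e1.2.2.1 = e2.2.2.1 ∧ e1.2.2.2 = e2.2.2.2))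
      (f := fun e2 => (e1.2.1, e1.2.2.1, e1.2.2.2, e2.2.1, e2.2.2.1, e2.2.2.2)),
      List.filter_filter]
    congr 1
    have hp : ∀ e2 : Int × String × Int × Int,
        ((decide (e1.1 < e2.1 ∧ |e2.2.2.1 - e1.2.2.1| ≤ md ∧ ¬(e1.2.2.1 = e2.2.2.1 ∧ e1.2.2.2 = e2.2.2.2))) &&
          (e2.2.2.1 - e2.2.2.2 == e1.2.2.1 - e1.2.2.2))
          = hitCond md e1 e2 := by
      intro e2
      simp only [hitCond, Bool.and_eq_decide, decide_eq_decide, beq_iff_eq, decide_eq_true_iff]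
      tauto
    rw [List.filter_congr (fun a _ => hp a)]
    rfl
  show es.foldl (fun out e1 =>
      ((es.foldl (fun b e => b.modify (e.2.2.1 - e.2.2.2) ([] : List (Int × String × Int × Int)) (· ++ [e]))
          PySem.Dict.empty).getD (e1.2.2.1 - e1.2.2.2) []).foldl (fun out e2 =>
        if e1.1 < e2.1 ∧ |e2.2.2.1 - e1.2.2.1| ≤ md ∧ ¬(e1.2.2.1 = e2.2.2.1 ∧ e1.2.2.2 = e2.2.2.2) then
          out ++ [(e1.2.1, e1.2.2.1, e1.2.2.2, e2.2.1, e2.2.2.1, e2.2.2.2)]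
        else out) out) [] = core md es
  rw [hfun, PySem.List.foldl_append_eq_flatMap]
  rfl

def auxA (md : Int) : List (String × List (Int × Int)) → List (String × Int × Int × String × Int × Int)
  | [] => []
  | kp1 :: rest =>
      kp1.2.flatMap (fun pq1 =>
        rest.flatMap (fun kp2 =>
          (kp2.2.filter (fun pq2 => decide (pq1.1 - pq1.2 = pq2.1 - pq2.2 ∧ |pq2.1 - pq1.1| ≤ md ∧ (pq1.1 ≠ pq2.1 ∨ pq1.2 ≠ pq2.2)))).map
            (fun pq2 => (kp1.1, pq1.1, pq1.2, kp2.1, pq2.1, pq2.2))))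
      ++ auxA md rest

-- the filtered flattened tail of `core` unfolds to A's nested per-k-mer loops
lemma ents_filter_flatMap (P : Int × Int → Bool) (F : String → Int × Int → String × Int × Int × String × Int × Int) :
    ∀ (l : List (String × List (Int × Int))) (h : Int),
    ((entsFrom h l).filter (fun e => P e.2.2)).map (fun e => F e.2.1 e.2.2)
      = l.flatMap (fun kp => (kp.2.filter P).map (fun pq => F kp.1 pq)) := by
  intro l
  induction l with
  | nil => intro h; rfl
  | cons kp rest ih =>
      intro h
      simp only [entsFrom, List.filter_append, List.map_append, List.flatMap_cons, ih]
      congr 1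
      simp [List.filter_map, List.map_map, Function.comp_def]

theorem aux_eq_core (md : Int) : ∀ (kps : List (String × List (Int × Int))) (g : Int),
    auxA md kps = core md (entsFrom g kps) := by
  intro kps
  induction kps with
  | nil => intro g; rfl
  | cons kp1 rest ih =>
      intro g
      show auxA md (kp1 :: rest)
        = (entsFrom g (kp1 :: rest)).flatMap
            (fun e1 => ((entsFrom g (kp1 :: rest)).filter (fun e2 => hitCond md e1 e2)).map (mkHit e1))
      rw [show entsFrom g (kp1 :: rest) = kp1.2.map (fun pq => (g, kp1.1, pq.1, pq.2)) ++ entsFrom (g + 1) rest from rfl,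
        List.flatMap_append]
      have head : (kp1.2.map (fun pq => (g, kp1.1, pq.1, pq.2))).flatMap
          (fun e1 => (((kp1.2.map (fun pq => (g, kp1.1, pq.1, pq.2)) ++ entsFrom (g + 1) rest).filter
              (fun e2 => hitCond md e1 e2)).map (mkHit e1)))
          = kp1.2.flatMap (fun pq1 =>
              rest.flatMap (fun kp2 =>
                (kp2.2.filter (fun pq2 => decide (pq1.1 - pq1.2 = pq2.1 - pq2.2 ∧ |pq2.1 - pq1.1| ≤ md ∧ (pq1.1 ≠ pq2.1 ∨ pq1.2 ≠ pq2.2)))).map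
                  (fun pq2 => (kp1.1, pq1.1, pq1.2, kp2.1, pq2.1, pq2.2)))) := by
        rw [List.flatMap_map]
        apply List.flatMap_congr
        intro pq1 _
        simp only [List.filter_append]
        have h1 : (kp1.2.map (fun pq => (g, kp1.1, pq.1, pq.2))).filter
            (fun e2 => hitCond md (g, kp1.1, pq1.1, pq1.2) e2) = [] := by
          apply List.filter_eq_nil_iff.mpr
          intro e2 he2
          simp only [List.mem_map] at he2
          obtain ⟨pq, _, rfl⟩ := he2
          simp only [hitCond, decide_eq_true_iff]
          intro h
          exact absurd h.2.1 (lt_irrefl g)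
        rw [h1, List.nil_append]
        have h2 : (entsFrom (g + 1) rest).filter (fun e2 => hitCond md (g, kp1.1, pq1.1, pq1.2) e2)
            = (entsFrom (g + 1) rest).filter
                (fun e2 => decide (pq1.1 - pq1.2 = e2.2.2.1 - e2.2.2.2 ∧ |e2.2.2.1 - pq1.1| ≤ md ∧ (pq1.1 ≠ e2.2.2.1 ∨ pq1.2 ≠ e2.2.2.2))) := by
          apply List.filter_congr
          intro e2 he2
          have hg := mem_entsFrom_ge e2 _ _ he2
          simp only [hitCond, decide_eq_decide]
          constructor
          · rintro ⟨hd, _, hdist, hne⟩; exact ⟨hd.symm, hdist, by tauto⟩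
          · rintro ⟨hd, hdist, hne⟩; exact ⟨hd.symm, by omega, hdist, by tauto⟩
        rw [h2]
        exact ents_filter_flatMap
          (fun pq2 => decide (pq1.1 - pq1.2 = pq2.1 - pq2.2 ∧ |pq2.1 - pq1.1| ≤ md ∧ (pq1.1 ≠ pq2.1 ∨ pq1.2 ≠ pq2.2)))
          (fun k2 pq2 => (kp1.1, pq1.1, pq1.2, k2, pq2.1, pq2.2)) rest (g + 1)
      have tail : (entsFrom (g + 1) rest).flatMap
          (fun e1 => (((kp1.2.map (fun pq => (g, kp1.1, pq.1, pq.2)) ++ entsFrom (g + 1) rest).filter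
              (fun e2 => hitCond md e1 e2)).map (mkHit e1)))
          = core md (entsFrom (g + 1) rest) := by
        apply List.flatMap_congr
        intro e1 he1
        have hg1 := mem_entsFrom_ge e1 _ _ he1
        rw [List.filter_append]
        have h1 : (kp1.2.map (fun pq => (g, kp1.1, pq.1, pq.2))).filter
            (fun e2 => hitCond md e1 e2) = [] := by
          apply List.filter_eq_nil_iff.mpr
          intro e2 he2
          simp only [List.mem_map] at he2
          obtain ⟨pq, _, rfl⟩ := he2
          simp only [hitCond, decide_eq_true_iff]
          intro h
          have := h.2.1
          simp at this
          omega
        rw [h1, List.nil_append]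
      show auxA md (kp1 :: rest) = _ ++ _
      rw [head, tail, ← ih (g + 1)]
      rfl

lemma foldl_if3 {α β : Type} (c1 c2 c3 : α → Prop) [DecidablePred c1] [DecidablePred c2] [DecidablePred c3]
    (f : α → β) (l : List α) (acc : List β) :
    l.foldl (fun a x => if c1 x then if c2 x then if c3 x then a ++ [f x] else a else a else a) acc
      = acc ++ (l.filter (fun x => decide (c1 x ∧ c2 x ∧ c3 x))).map f := by
  have h : (fun (a : List β) x => if c1 x then if c2 x then if c3 x then a ++ [f x] else a else a else a)
      = (fun a x => if decide (c1 x ∧ c2 x ∧ c3 x) = true then a ++ [f x] else a) := by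
    funext a x
    by_cases h1 : c1 x <;> by_cases h2 : c2 x <;> by_cases h3 : c3 x <;> simp [h1, h2, h3]
  rw [h, PySem.List.foldl_append_if]

-- the body of A's outer loop at index a, as an append of the per-k-mer emissions
lemma body_eq (kps : List (String × List (Int × Int))) (md : Int) (a : Nat) (ha : a < kps.length)
    (dh : List (String × Int × Int × String × Int × Int)) :
    (let kp1 := PySem.List.pyGetD kps (a : Int) ("", [])
     kp1.2.foldl (fun dh pq1 =>
      (PySem.List.pyRange ((a : Int) + 1) (kps.length : Int) 1).foldl (fun dh j =>
        let kp2 := PySem.List.pyGetD kps j ("", [])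
        kp2.2.foldl (fun dh pq2 =>
          if pq1.1 - pq1.2 = pq2.1 - pq2.2 then
            if |pq2.1 - pq1.1| ≤ md then
              if pq1.1 ≠ pq2.1 ∨ pq1.2 ≠ pq2.2 then
                dh ++ [(kp1.1, pq1.1, pq1.2, kp2.1, pq2.1, pq2.2)]
              else dh
            else dh
          else dh) dh) dh) dh)
    = dh ++ (kps[a].2.flatMap (fun pq1 =>
        (kps.drop (a + 1)).flatMap (fun kp2 =>
          (kp2.2.filter (fun pq2 => decide (pq1.1 - pq1.2 = pq2.1 - pq2.2 ∧ |pq2.1 - pq1.1| ≤ md ∧ (pq1.1 ≠ pq2.1 ∨ pq1.2 ≠ pq2.2)))).map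
            (fun pq2 => (kps[a].1, pq1.1, pq1.2, kp2.1, pq2.1, pq2.2))))) := by
  have hget : PySem.List.pyGetD kps (a : Int) ("", []) = kps[a] := by
    rw [PySem.List.pyGetD_natCast]
    exact List.getD_eq_getElem kps ("", []) ha
  simp only [hget]
  have houter : (fun (dh : List (String × Int × Int × String × Int × Int)) (pq1 : Int × Int) =>
      (PySem.List.pyRange ((a : Int) + 1) (kps.length : Int) 1).foldl (fun dh j =>
        (PySem.List.pyGetD kps j ("", [])).2.foldl (fun dh pq2 =>
          if pq1.1 - pq1.2 = pq2.1 - pq2.2 then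
            if |pq2.1 - pq1.1| ≤ md then
              if pq1.1 ≠ pq2.1 ∨ pq1.2 ≠ pq2.2 then
                dh ++ [(kps[a].1, pq1.1, pq1.2, (PySem.List.pyGetD kps j ("", [])).1, pq2.1, pq2.2)]
              else dh
            else dh
          else dh) dh) dh)
      = (fun dh pq1 => dh ++
          (kps.drop (a + 1)).flatMap (fun kp2 =>
            (kp2.2.filter (fun pq2 => decide (pq1.1 - pq1.2 = pq2.1 - pq2.2 ∧ |pq2.1 - pq1.1| ≤ md ∧ (pq1.1 ≠ pq2.1 ∨ pq1.2 ≠ pq2.2)))).map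
              (fun pq2 => (kps[a].1, pq1.1, pq1.2, kp2.1, pq2.1, pq2.2)))) := by
    funext dh' pq1
    have hc : ((a : Int) + 1) = ((a + 1 : Nat) : Int) := by push_cast; ring
    rw [hc, PySem.List.foldl_pyRange_pyGetD' (xs := kps) (d := ("", []))
      (f := fun acc (kp2 : String × List (Int × Int)) => kp2.2.foldl (fun dh pq2 =>
          if pq1.1 - pq1.2 = pq2.1 - pq2.2 then
            if |pq2.1 - pq1.1| ≤ md then
              if pq1.1 ≠ pq2.1 ∨ pq1.2 ≠ pq2.2 then
                dh ++ [(kps[a].1, pq1.1, pq1.2, kp2.1, pq2.1, pq2.2)]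
              else dh
            else dh
          else dh) acc) (init := dh') (Int.natCast_nonneg _)]
    rw [Int.toNat_natCast]
    have hin : (fun (dh : List (String × Int × Int × String × Int × Int)) (kp2 : String × List (Int × Int)) =>
        kp2.2.foldl (fun dh pq2 =>
          if pq1.1 - pq1.2 = pq2.1 - pq2.2 then
            if |pq2.1 - pq1.1| ≤ md then
              if pq1.1 ≠ pq2.1 ∨ pq1.2 ≠ pq2.2 then
                dh ++ [(kps[a].1, pq1.1, pq1.2, kp2.1, pq2.1, pq2.2)]
              else dh
            else dh
          else dh) dh)
        = (fun dh kp2 => dh ++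
            (kp2.2.filter (fun pq2 => decide (pq1.1 - pq1.2 = pq2.1 - pq2.2 ∧ |pq2.1 - pq1.1| ≤ md ∧ (pq1.1 ≠ pq2.1 ∨ pq1.2 ≠ pq2.2)))).map
              (fun pq2 => (kps[a].1, pq1.1, pq1.2, kp2.1, pq2.1, pq2.2))) := by
      funext dh'' kp2
      exact foldl_if3 (fun pq2 : Int × Int => pq1.1 - pq1.2 = pq2.1 - pq2.2) (fun pq2 : Int × Int => |pq2.1 - pq1.1| ≤ md)
        (fun pq2 : Int × Int => pq1.1 ≠ pq2.1 ∨ pq1.2 ≠ pq2.2) _ _ _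
    rw [hin, PySem.List.foldl_append_eq_flatMap]
  rw [houter, PySem.List.foldl_append_eq_flatMap]

theorem iloop (kps : List (String × List (Int × Int))) (md : Int) :
    ∀ (n a : Nat) (dh : List (String × Int × Int × String × Int × Int)), kps.length - a = n →
    (PySem.List.pyRange (a : Int) (kps.length : Int) 1).foldl (fun dh i =>
      let kp1 := PySem.List.pyGetD kps i ("", [])
      kp1.2.foldl (fun dh pq1 =>
        (PySem.List.pyRange (i + 1) (kps.length : Int) 1).foldl (fun dh j =>
          let kp2 := PySem.List.pyGetD kps j ("", [])
          kp2.2.foldl (fun dh pq2 =>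
            if pq1.1 - pq1.2 = pq2.1 - pq2.2 then
              if |pq2.1 - pq1.1| ≤ md then
                if pq1.1 ≠ pq2.1 ∨ pq1.2 ≠ pq2.2 then
                  dh ++ [(kp1.1, pq1.1, pq1.2, kp2.1, pq2.1, pq2.2)]
                else dh
              else dh
            else dh) dh) dh) dh) dh
      = dh ++ auxA md (kps.drop a) := by
  intro n
  induction n with
  | zero =>
      intro a dh h
      have hle : kps.length ≤ a := by omega
      rw [PySem.List.pyRange_one_eq_nil (by exact_mod_cast hle), List.drop_eq_nil_of_le hle]
      simp [auxA]
  | succ n ihn =>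
      intro a dh h
      have ha : a < kps.length := by omega
      rw [PySem.List.pyRange_one_cons (by exact_mod_cast ha), List.foldl_cons]
      rw [body_eq kps md a ha dh]
      rw [show ((a : Int) + 1) = ((a + 1 : Nat) : Int) from by push_cast; ring]
      rw [ihn (a + 1) _ (by omega)]
      rw [List.drop_eq_getElem_cons ha]
      show _ = dh ++ (auxA md (kps[a] :: kps.drop (a + 1)))
      rw [show auxA md (kps[a] :: kps.drop (a + 1))
          = kps[a].2.flatMap (fun pq1 =>
              (kps.drop (a + 1)).flatMap (fun kp2 =>
                (kp2.2.filter (fun pq2 => decide (pq1.1 - pq1.2 = pq2.1 - pq2.2 ∧ |pq2.1 - pq1.1| ≤ md ∧ (pq1.1 ≠ pq2.1 ∨ pq1.2 ≠ pq2.2)))).map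
                  (fun pq2 => (kps[a].1, pq1.1, pq1.2, kp2.1, pq2.1, pq2.2))))
            ++ auxA md (kps.drop (a + 1)) from rfl]
      rw [List.append_assoc]

theorem A_eq_aux (kps : List (String × List (Int × Int))) (md : Int) :
    find_double_hits kps md = auxA md kps := by
  have h := iloop kps md kps.length 0 [] (by omega)
  simpa [find_double_hits] using h

-- ===== VERDICT (by name: the statement is the Claim_ definition above) =====
theorem find_double_hits_spec : Claim_equal_find_double_hits := by
  intro kps md _
  unfold Spec_find_double_hits
  rw [A_eq_aux, aux_eq_core md kps 0, B_eq_core]
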